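-- pv_equiv track=rewrite | github.com/patmorin/anagram-free2 | countem.py | anagram_suffix
-- ===== SOURCE A (Python) =====
-- import collections
--
-- def histogram_distance(hist0, hist1):
--     """Return the L1 distance between two histograms"""
--     dist = 0
--     for c in hist0.keys():
--         dist += abs(hist0[c] - hist1[c])
--     for c in hist1:
--         if c not in hist0: dist += abs(hist0[c] - hist1[c])
--     return dist
--
-- def equal_histograms(hist0, hist1):
--     """Return true iff two histograms are equal"""
--     return histogram_distance(hist0, hist1) == 0
--
-- def anagram_suffix(s, amax=0):
--     """Return half the length of the shortest non-empty suffix of s that is an anagram, or 0 if no such suffix exists"""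
--     hist0 = collections.defaultdict(int)
--     hist1 = collections.defaultdict(int)
--     for t in range(1, len(s)//2+1):
--         hist0[s[len(s)-2*t]] += 1
--         hist0[s[len(s)-2*t+1]] += 1
--         hist0[s[len(s)-t]] -= 1
--         hist1[s[len(s)-t]] += 1
--         if amax < t and equal_histograms(hist0, hist1): return t
--     return 0
-- ===== SOURCE B (Python) =====
-- def anagram_suffix(s, amax=0):
--     """Return half the length of the shortest non-empty suffix of s that is an anagram, or 0 if no such suffix exists.
--
--     Incremental: maintain d[c] = count(c, first half) - count(c, second half) of the
--     current candidate suffix, plus nz = number of characters with d[c] != 0; the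
--     anagram test is then just nz == 0.
--     """
--     n = len(s)
--     d = {}
--     nz = 0
--
--     def bump(c, delta):
--         nonlocal nz
--         old = d.get(c, 0)
--         new = old + delta
--         d[c] = new
--         nz += (new != 0) - (old != 0)
--
--     for t in range(1, n // 2 + 1):
--         bump(s[n - 2 * t], 1)
--         bump(s[n - 2 * t + 1], 1)
--         bump(s[n - t], -2)
--         if amax < t and nz == 0:
--             return t
--     return 0
-- ===== Notes on version B (the rewrite author's own statement) =====
-- stated objective: alternative
-- what changed: A re-derives the anagram test each step by calling histogram_distance, which scans all keys of both histograms; B instead maintains a single signed-difference dict together with a running count of its nonzero entries and tests that counter, never scanning a histogram.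
import Mathlib
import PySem

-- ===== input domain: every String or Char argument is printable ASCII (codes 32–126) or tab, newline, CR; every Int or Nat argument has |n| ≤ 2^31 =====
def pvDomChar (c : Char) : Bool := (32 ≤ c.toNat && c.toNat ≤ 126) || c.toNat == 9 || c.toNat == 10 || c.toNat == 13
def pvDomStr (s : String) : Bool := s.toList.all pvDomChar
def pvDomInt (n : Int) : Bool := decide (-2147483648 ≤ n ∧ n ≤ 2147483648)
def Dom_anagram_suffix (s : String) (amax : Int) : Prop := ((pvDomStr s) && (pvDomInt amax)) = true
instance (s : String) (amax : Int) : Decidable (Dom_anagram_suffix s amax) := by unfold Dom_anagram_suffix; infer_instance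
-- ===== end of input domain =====

-- B replaces A's per-step rescan of both histograms (histogram_distance over all keys)
-- by one signed-difference dict plus a running count of its nonzero entries (objective: alternative).

-- ===== PORT A =====
-- port of histogram_distance(hist0, hist1) on int-defaultdicts, INCLUDING the defaultdict
-- side effect: hist1[c] (resp. hist0[c]) inserts a missing key with value 0, and those
-- insertions persist in the caller's dicts; so it returns (dist, hist0', hist1').
-- (hist0[c] in the first loop has c ∈ hist0.keys(), hence reads h0.getD c 0 without inserting;
--  in the second loop c ∉ hist0, so hist0[c] reads acc.2.getD c 0 = 0 and inserts c with 0.)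
def histDistA (h0 h1 : PySem.Dict Char Int) : Int × PySem.Dict Char Int × PySem.Dict Char Int :=
  -- for c in hist0.keys(): dist += abs(hist0[c] - hist1[c])   (mutates hist1)
  let p1 : Int × PySem.Dict Char Int :=
    h0.keys.foldl
      (fun acc c =>
        (acc.1 + |h0.getD c 0 - acc.2.getD c 0|,
         if acc.2.contains c then acc.2 else acc.2.insert c 0))
      (0, h1)
  -- for c in hist1: if c not in hist0: dist += abs(hist0[c] - hist1[c])   (mutates hist0)
  let p2 : Int × PySem.Dict Char Int :=
    p1.2.keys.foldl
      (fun acc c =>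
        if acc.2.contains c then acc
        else (acc.1 + |acc.2.getD c 0 - p1.2.getD c 0|, acc.2.insert c 0))
      (p1.1, h0)
  (p2.1, p2.2, p1.2)

-- the main loop of A: for t in range(1, len(s)//2+1), with the two defaultdicts as state;
-- 'return t' is the first branch of the recursion.  Indices len(s)-2t, len(s)-2t+1, len(s)-t
-- are always in range for t in this range, so pyGetD's fallback ' ' is never used.
def loopA (cs : List Char) (n amax : Int) : List Int → PySem.Dict Char Int → PySem.Dict Char Int → Int
  | [], _, _ => 0
  | t :: ts, h0, h1 =>
    let h0 := h0.modify (PySem.List.pyGetD cs (n - 2*t) ' ') 0 (· + 1)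
    let h0 := h0.modify (PySem.List.pyGetD cs (n - 2*t + 1) ' ') 0 (· + 1)
    let h0 := h0.modify (PySem.List.pyGetD cs (n - t) ' ') 0 (· - 1)
    let h1 := h1.modify (PySem.List.pyGetD cs (n - t) ' ') 0 (· + 1)
    if amax < t then
      -- equal_histograms(hist0, hist1) = (histogram_distance(hist0, hist1) == 0)
      let r := histDistA h0 h1
      if r.1 = 0 then t else loopA cs n amax ts r.2.1 r.2.2
    else loopA cs n amax ts h0 h1

def anagram_suffix (s : String) (amax : Int) : Int :=
  loopA s.toList (PySem.Str.len s) amax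
    (PySem.List.pyRange 1 (PySem.Int.floordiv (PySem.Str.len s) 2 + 1) 1)
    PySem.Dict.empty PySem.Dict.empty

-- ===== PORT B =====
-- bump(c, delta): update d[c] and the count nz of keys with nonzero value
def bumpB (st : PySem.Dict Char Int × Int) (c : Char) (delta : Int) : PySem.Dict Char Int × Int :=
  let old := st.1.getD c 0
  let nw := old + delta
  (st.1.insert c nw, st.2 + ((if nw ≠ 0 then 1 else 0) - (if old ≠ 0 then 1 else 0)))

def loopB (cs : List Char) (n amax : Int) : List Int → PySem.Dict Char Int × Int → Int
  | [], _ => 0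
  | t :: ts, st =>
    let st := bumpB st (PySem.List.pyGetD cs (n - 2*t) ' ') 1
    let st := bumpB st (PySem.List.pyGetD cs (n - 2*t + 1) ' ') 1
    let st := bumpB st (PySem.List.pyGetD cs (n - t) ' ') (-2)
    if amax < t ∧ st.2 = 0 then t else loopB cs n amax ts st

def anagram_suffix_alt (s : String) (amax : Int) : Int :=
  loopB s.toList (PySem.Str.len s) amax
    (PySem.List.pyRange 1 (PySem.Int.floordiv (PySem.Str.len s) 2 + 1) 1)
    (PySem.Dict.empty, 0)

-- ===== PRECONDITION & SPEC =====
def Spec_anagram_suffix (s : String) (amax : Int) (out : Int) : Prop := out = anagram_suffix_alt s amax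
instance (s : String) (amax : Int) (out : Int) : Decidable (Spec_anagram_suffix s amax out) := by unfold Spec_anagram_suffix; infer_instance

-- ===== CLAIM (what is proved, stated in full; the proofs are below) =====
def Claim_equal_anagram_suffix : Prop := ∀ (s : String) (amax : Int), Dom_anagram_suffix s amax → Spec_anagram_suffix s amax (anagram_suffix s amax)


-- ===== LEMMAS AND PROOFS =====

-- number of keys of d whose value is nonzero (on nodup keys this is B's nz counter)
def Zm (d : PySem.Dict Char Int) : Int :=
  ((d.keys.filter (fun c => decide (d.getD c 0 ≠ 0))).length : Int)

-- the invariant tying A's two histograms to B's (difference dict, nonzero count) state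
def HInv (h0 h1 d : PySem.Dict Char Int) (nz : Int) : Prop :=
  h0.keys.Nodup ∧ h1.keys.Nodup ∧ d.keys.Nodup ∧
  (∀ c, d.getD c 0 = h0.getD c 0 - h1.getD c 0) ∧ nz = Zm d

lemma nodup_keys_modify (d : PySem.Dict Char Int) (k : Char) (d0 : Int) (f : Int → Int)
    (h : d.keys.Nodup) : (d.modify k d0 f).keys.Nodup := by
  rw [PySem.Dict.keys_modify]
  exact PySem.Dict.nodup_keys_insert _ _ _ h

-- swapping a predicate at exactly one element of a nodup list changes the filter length by the two indicators
lemma filter_len_swap {α : Type} [DecidableEq α] (p q : α → Bool) :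
    ∀ (ks : List α) (c : α), ks.Nodup → c ∈ ks → (∀ x ∈ ks, x ≠ c → p x = q x) →
    ((ks.filter q).length : Int)
      = ((ks.filter p).length : Int) + (if q c then 1 else 0) - (if p c then 1 else 0) := by
  intro ks
  induction ks with
  | nil => intro c _ hc; simp at hc
  | cons a t ih =>
    intro c hnd hc hoff
    rcases List.mem_cons.1 hc with rfl | hct
    · have hna : c ∉ t := (List.nodup_cons.1 hnd).1
      have : t.filter p = t.filter q := by
        apply List.filter_congr
        intro x hx
        exact hoff x (List.mem_cons_of_mem _ hx) (fun h => hna (h ▸ hx))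
      simp [List.filter_cons, this]
      by_cases hq : q c <;> by_cases hp : p c <;> simp [hq, hp]
    · have hne : a ≠ c := fun h => (List.nodup_cons.1 hnd).1 (h ▸ hct)
      have hpa : p a = q a := hoff a (List.mem_cons_self) hne
      have := ih c (List.nodup_cons.1 hnd).2 hct
        (fun x hx hxc => hoff x (List.mem_cons_of_mem _ hx) hxc)
      simp [List.filter_cons, ← hpa]
      by_cases hp : p a <;> simp [hp] <;> omega

lemma Z_insert (d : PySem.Dict Char Int) (c : Char) (v : Int) (hnd : d.keys.Nodup) :
    Zm (d.insert c v)
      = Zm d + (if v ≠ 0 then 1 else 0) - (if d.getD c 0 ≠ 0 then 1 else 0) := by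
  by_cases hc : d.contains c
  · unfold Zm
    rw [PySem.Dict.keys_insert_of_contains d v hc]
    rw [filter_len_swap (fun x => decide (d.getD x 0 ≠ 0)) (fun x => decide ((d.insert c v).getD x 0 ≠ 0))
      d.keys c hnd ((PySem.Dict.contains_iff_mem_keys d c).1 hc)]
    · simp
    · intro x hx hxc
      simp [PySem.Dict.getD_insert, hxc]
  · have hcf : d.contains c = false := by
      cases h : d.contains c
      · rfl
      · exact absurd h hc
    have hold : d.getD c 0 = 0 := PySem.Dict.getD_of_not_contains d 0 hcf
    unfold Zm
    rw [PySem.Dict.keys_insert_of_not_contains d v hcf]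
    rw [List.filter_append]
    have hcm : c ∉ d.keys := fun h => hc ((PySem.Dict.contains_iff_mem_keys d c).2 h)
    have : d.keys.filter (fun x => decide ((d.insert c v).getD x 0 ≠ 0))
        = d.keys.filter (fun x => decide (d.getD x 0 ≠ 0)) := by
      apply List.filter_congr
      intro x hx
      have : x ≠ c := fun h => hcm (h ▸ hx)
      simp [PySem.Dict.getD_insert, this]
    rw [this, hold]
    simp [PySem.Dict.getD_insert, List.length_append]
    by_cases hv : v = 0 <;> simp [hv]

lemma Z_eq_zero_iff (d : PySem.Dict Char Int) : Zm d = 0 ↔ ∀ c, d.getD c 0 = 0 := by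
  unfold Zm
  rw [Nat.cast_eq_zero, List.length_eq_zero_iff, List.filter_eq_nil_iff]
  constructor
  · intro h c
    by_cases hc : d.contains c
    · have := h c ((PySem.Dict.contains_iff_mem_keys d c).1 hc)
      simpa using this
    · have hcf : d.contains c = false := by
        cases h' : d.contains c
        · rfl
        · exact absurd h' hc
      exact PySem.Dict.getD_of_not_contains d 0 hcf
  · intro h c _
    simp [h c]

lemma Z_empty : Zm (PySem.Dict.empty) = 0 := by
  simp [Zm, PySem.Dict.keys_empty]

lemma sum_map_abs_nonneg {α : Type} (l : List α) (f : α → Int) :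
    0 ≤ (l.map (fun x => |f x|)).sum := by
  apply List.sum_nonneg
  intro x hx
  obtain ⟨y, _, rfl⟩ := List.mem_map.1 hx
  exact abs_nonneg _

lemma sum_map_abs_eq_zero {α : Type} (l : List α) (f : α → Int) :
    (l.map (fun x => |f x|)).sum = 0 ↔ ∀ x ∈ l, f x = 0 := by
  induction l with
  | nil => simp
  | cons a t ih =>
    have h1 : 0 ≤ |f a| := abs_nonneg _
    have h2 : 0 ≤ (t.map (fun x => |f x|)).sum := by
      apply List.sum_nonneg; intro x hx
      obtain ⟨y, _, rfl⟩ := List.mem_map.1 hx; exact abs_nonneg _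
    simp only [List.map_cons, List.sum_cons, List.mem_cons]
    constructor
    · intro h
      have ha : |f a| = 0 := by omega
      have ht : (t.map (fun x => |f x|)).sum = 0 := by omega
      exact fun x hx => hx.elim (fun h => h ▸ abs_eq_zero.1 ha) (ih.1 ht x)
    · intro h
      have : |f a| = 0 := abs_eq_zero.2 (h a (Or.inl rfl))
      rw [this, ih.2 (fun x hx => h x (Or.inr hx))]; ring

-- what bumpB does, given the counter invariant
lemma bumpB_spec (d : PySem.Dict Char Int) (nz : Int) (c : Char) (δ : Int)
    (hnd : d.keys.Nodup) (hz : nz = Zm d) :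
    (bumpB (d, nz) c δ).1.keys.Nodup ∧ (bumpB (d, nz) c δ).2 = Zm (bumpB (d, nz) c δ).1 ∧
    (∀ c', (bumpB (d, nz) c δ).1.getD c' 0 = d.getD c' 0 + (if c' = c then δ else 0)) := by
  unfold bumpB
  refine ⟨PySem.Dict.nodup_keys_insert _ _ _ hnd, ?_, ?_⟩
  · simp only
    rw [Z_insert d c _ hnd, hz]
    ring
  · intro c'
    simp only [PySem.Dict.getD_insert]
    by_cases h : c' = c <;> simp [h]

-- first loop of histogram_distance: sums |h0[c]-h1[c]| over h0's keys; its defaultdict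
-- accesses insert h0's missing keys into h1 with value 0 (values and nodup keys preserved)
lemma fold1_spec (h0 hO : PySem.Dict Char Int) :
    ∀ (ks : List Char) (dist : Int) (h1 : PySem.Dict Char Int),
    (∀ c, h1.getD c 0 = hO.getD c 0) → h1.keys.Nodup →
    (∀ c, hO.contains c = true → h1.contains c = true) →
    (ks.foldl (fun acc c => (acc.1 + |h0.getD c 0 - acc.2.getD c 0|,
         if acc.2.contains c then acc.2 else acc.2.insert c 0)) (dist, h1)).1
        = dist + (ks.map (fun c => |h0.getD c 0 - hO.getD c 0|)).sum
    ∧ (∀ c, (ks.foldl (fun acc c => (acc.1 + |h0.getD c 0 - acc.2.getD c 0|,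
         if acc.2.contains c then acc.2 else acc.2.insert c 0)) (dist, h1)).2.getD c 0 = hO.getD c 0)
    ∧ (ks.foldl (fun acc c => (acc.1 + |h0.getD c 0 - acc.2.getD c 0|,
         if acc.2.contains c then acc.2 else acc.2.insert c 0)) (dist, h1)).2.keys.Nodup
    ∧ (∀ c, hO.contains c = true → (ks.foldl (fun acc c => (acc.1 + |h0.getD c 0 - acc.2.getD c 0|,
         if acc.2.contains c then acc.2 else acc.2.insert c 0)) (dist, h1)).2.contains c = true) := by
  intro ks
  induction ks with
  | nil => intro dist h1 hg hn hm; exact ⟨by simp, hg, hn, hm⟩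
  | cons a t ih =>
    intro dist h1 hg hn hm
    simp only [List.foldl_cons, List.map_cons, List.sum_cons]
    by_cases hca : h1.contains a
    · simp only [hca, if_true]
      have := ih (dist + |h0.getD a 0 - h1.getD a 0|) h1 hg hn hm
      refine ⟨?_, this.2⟩
      rw [this.1, hg a]; ring
    · have hcf : h1.contains a = false := by
        cases h : h1.contains a
        · rfl
        · exact absurd h hca
      simp only [hcf, Bool.false_eq_true, if_false]
      have hg' : ∀ c, (h1.insert a 0).getD c 0 = hO.getD c 0 := by
        intro c
        rw [PySem.Dict.getD_insert]
        by_cases hc : c = a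
        · subst hc
          rw [if_pos rfl, ← hg c, PySem.Dict.getD_of_not_contains h1 0 hcf]
        · rw [if_neg hc, hg c]
      have hm' : ∀ c, hO.contains c = true → (h1.insert a 0).contains c = true := by
        intro c hc
        rw [PySem.Dict.contains_insert]
        simp [hm c hc]
      have := ih (dist + |h0.getD a 0 - h1.getD a 0|) (h1.insert a 0) hg'
        (PySem.Dict.nodup_keys_insert _ _ _ hn) hm'
      refine ⟨?_, this.2⟩
      rw [this.1, hg a]; ring

-- second loop of histogram_distance: sums |h0[c]-h1m[c]| over h1m's keys missing from
-- hist0, inserting each such key into hist0 with value 0 as the defaultdict access does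
lemma fold2_spec (hO h1m : PySem.Dict Char Int) :
    ∀ (ks : List Char) (dist : Int) (h0 : PySem.Dict Char Int),
    ks.Nodup → (∀ c ∈ ks, h0.contains c = hO.contains c) →
    (∀ c, h0.getD c 0 = hO.getD c 0) → h0.keys.Nodup →
    (ks.foldl (fun acc c => if acc.2.contains c then acc
        else (acc.1 + |acc.2.getD c 0 - h1m.getD c 0|, acc.2.insert c 0)) (dist, h0)).1
      = dist + ((ks.filter (fun c => !hO.contains c)).map
          (fun c => |hO.getD c 0 - h1m.getD c 0|)).sum
    ∧ (∀ c, (ks.foldl (fun acc c => if acc.2.contains c then acc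
        else (acc.1 + |acc.2.getD c 0 - h1m.getD c 0|, acc.2.insert c 0)) (dist, h0)).2.getD c 0 = hO.getD c 0)
    ∧ (ks.foldl (fun acc c => if acc.2.contains c then acc
        else (acc.1 + |acc.2.getD c 0 - h1m.getD c 0|, acc.2.insert c 0)) (dist, h0)).2.keys.Nodup := by
  intro ks
  induction ks with
  | nil => intro dist h0 _ _ hg hn; exact ⟨by simp, hg, hn⟩
  | cons a t ih =>
    intro dist h0 hnd hcs hg hn
    have hca : h0.contains a = hO.contains a := hcs a List.mem_cons_self
    simp only [List.foldl_cons, List.filter_cons]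
    by_cases hOa : hO.contains a
    · simp only [hca, hOa, if_true, Bool.not_true, Bool.false_eq_true, if_false]
      exact ih dist h0 (List.nodup_cons.1 hnd).2
        (fun c hc => hcs c (List.mem_cons_of_mem _ hc)) hg hn
    · have hOf : hO.contains a = false := by
        cases h : hO.contains a
        · rfl
        · exact absurd h hOa
      have hcf : h0.contains a = false := hca.trans hOf
      simp only [hca, hOf, Bool.false_eq_true, if_false, Bool.not_false, if_true,
        List.map_cons, List.sum_cons]
      have hna : a ∉ t := (List.nodup_cons.1 hnd).1
      have hg' : ∀ c, (h0.insert a 0).getD c 0 = hO.getD c 0 := by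
        intro c
        rw [PySem.Dict.getD_insert]
        by_cases hc : c = a
        · subst hc
          rw [if_pos rfl, ← hg c, PySem.Dict.getD_of_not_contains h0 0 hcf]
        · rw [if_neg hc, hg c]
      have hcs' : ∀ c ∈ t, (h0.insert a 0).contains c = hO.contains c := by
        intro c hc
        rw [PySem.Dict.contains_insert]
        have : c ≠ a := fun h => hna (h ▸ hc)
        simp [this, hcs c (List.mem_cons_of_mem _ hc)]
      have := ih (dist + |h0.getD a 0 - h1m.getD a 0|) (h0.insert a 0)
        (List.nodup_cons.1 hnd).2 hcs' hg' (PySem.Dict.nodup_keys_insert _ _ _ hn)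
      refine ⟨?_, this.2⟩
      rw [this.1, hg a]; ring

-- histogram_distance: its value is 0 iff the two histograms agree everywhere, and the
-- defaultdict insertions it performs change no value and keep keys nodup
lemma histDistA_spec (h0 h1 : PySem.Dict Char Int)
    (hn0 : h0.keys.Nodup) (hn1 : h1.keys.Nodup) :
    ((histDistA h0 h1).1 = 0 ↔ ∀ c, h0.getD c 0 = h1.getD c 0)
    ∧ (∀ c, (histDistA h0 h1).2.1.getD c 0 = h0.getD c 0)
    ∧ (∀ c, (histDistA h0 h1).2.2.getD c 0 = h1.getD c 0)
    ∧ (histDistA h0 h1).2.1.keys.Nodup ∧ (histDistA h0 h1).2.2.keys.Nodup := by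
  unfold histDistA
  simp only
  obtain ⟨hp1, hp1g, hp1n, hp1m⟩ :=
    fold1_spec h0 h1 h0.keys 0 h1 (fun _ => rfl) hn1 (fun _ h => h)
  set p1 := h0.keys.foldl
      (fun acc c => (acc.1 + |h0.getD c 0 - acc.2.getD c 0|,
         if acc.2.contains c then acc.2 else acc.2.insert c 0)) ((0 : Int), h1) with hp1def
  obtain ⟨hp2, hp2g, hp2n⟩ :=
    fold2_spec h0 p1.2 p1.2.keys p1.1 h0 hp1n (fun _ _ => rfl) (fun _ => rfl) hn0
  set p2 := p1.2.keys.foldl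
      (fun acc c => if acc.2.contains c then acc
        else (acc.1 + |acc.2.getD c 0 - p1.2.getD c 0|, acc.2.insert c 0)) (p1.1, h0) with hp2def
  refine ⟨?_, hp2g, hp1g, hp2n, hp1n⟩
  rw [hp2, hp1]
  have hS2 : ((p1.2.keys.filter (fun c => !h0.contains c)).map
          (fun c => |h0.getD c 0 - p1.2.getD c 0|)).sum
      = ((p1.2.keys.filter (fun c => !h0.contains c)).map
          (fun c => |h0.getD c 0 - h1.getD c 0|)).sum := by
    apply congrArg
    apply List.map_congr_left
    intro c _
    rw [hp1g c]
  rw [hS2, zero_add]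
  have n1 : 0 ≤ (h0.keys.map (fun c => |h0.getD c 0 - h1.getD c 0|)).sum :=
    sum_map_abs_nonneg _ (fun c => h0.getD c 0 - h1.getD c 0)
  have n2 : 0 ≤ ((p1.2.keys.filter (fun c => !h0.contains c)).map
      (fun c => |h0.getD c 0 - h1.getD c 0|)).sum :=
    sum_map_abs_nonneg _ (fun c => h0.getD c 0 - h1.getD c 0)
  constructor
  · intro h c
    have h1z : (h0.keys.map (fun c => |h0.getD c 0 - h1.getD c 0|)).sum = 0 := by omega
    have h2z : ((p1.2.keys.filter (fun c => !h0.contains c)).map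
        (fun c => |h0.getD c 0 - h1.getD c 0|)).sum = 0 := by omega
    have e1 := (sum_map_abs_eq_zero _ (fun c => h0.getD c 0 - h1.getD c 0)).1 h1z
    have e2 := (sum_map_abs_eq_zero _ (fun c => h0.getD c 0 - h1.getD c 0)).1 h2z
    by_cases hc0 : h0.contains c
    · have := e1 c ((PySem.Dict.contains_iff_mem_keys h0 c).1 hc0)
      omega
    · have hc0f : h0.contains c = false := by
        cases h' : h0.contains c
        · rfl
        · exact absurd h' hc0
      by_cases hcp : p1.2.contains c
      · have hmem : c ∈ p1.2.keys.filter (fun c => !h0.contains c) :=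
          List.mem_filter.2 ⟨(PySem.Dict.contains_iff_mem_keys p1.2 c).1 hcp, by simp [hc0f]⟩
        have := e2 c hmem
        omega
      · have hc1f : h1.contains c = false := by
          cases h' : h1.contains c
          · rfl
          · exact absurd (hp1m c h') hcp
        rw [PySem.Dict.getD_of_not_contains h0 0 hc0f,
          PySem.Dict.getD_of_not_contains h1 0 hc1f]
  · intro h
    have e1 : (h0.keys.map (fun c => |h0.getD c 0 - h1.getD c 0|)).sum = 0 :=
      (sum_map_abs_eq_zero _ (fun c => h0.getD c 0 - h1.getD c 0)).2 (fun c _ => by rw [h c]; ring)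
    have e2 : ((p1.2.keys.filter (fun c => !h0.contains c)).map
        (fun c => |h0.getD c 0 - h1.getD c 0|)).sum = 0 :=
      (sum_map_abs_eq_zero _ (fun c => h0.getD c 0 - h1.getD c 0)).2 (fun c _ => by rw [h c]; ring)
    omega

-- net effect of one loop iteration on A's two histograms, as a pointwise difference
lemma getD_update_A (h0 h1 : PySem.Dict Char Int) (x0 x1 y c : Char) :
    (((h0.modify x0 0 (· + 1)).modify x1 0 (· + 1)).modify y 0 (· - 1)).getD c 0
      - (h1.modify y 0 (· + 1)).getD c 0
    = (h0.getD c 0 - h1.getD c 0) + (if c = x0 then 1 else 0)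
      + (if c = x1 then 1 else 0) + (if c = y then (-2) else 0) := by
  simp only [PySem.Dict.getD_modify]
  split_ifs <;> simp_all <;> ring

lemma loop_eq (cs : List Char) (n amax : Int) :
    ∀ (ts : List Int) (h0 h1 d : PySem.Dict Char Int) (nz : Int),
    HInv h0 h1 d nz → loopA cs n amax ts h0 h1 = loopB cs n amax ts (d, nz) := by
  intro ts
  induction ts with
  | nil => intro h0 h1 d nz _; simp [loopA, loopB]
  | cons t ts ih =>
    intro h0 h1 d nz hinv
    obtain ⟨hn0, hn1, hnd, hrel, hz⟩ := hinv
    simp only [loopA, loopB]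
    set x0 := PySem.List.pyGetD cs (n - 2*t) ' ' with hx0
    set x1 := PySem.List.pyGetD cs (n - 2*t + 1) ' ' with hx1
    set y := PySem.List.pyGetD cs (n - t) ' ' with hy
    -- A's updated histograms
    set h0a := ((h0.modify x0 0 (· + 1)).modify x1 0 (· + 1)).modify y 0 (· - 1) with hh0a
    set h1a := h1.modify y 0 (· + 1) with hh1a
    have hn0a : h0a.keys.Nodup :=
      nodup_keys_modify _ _ _ _ (nodup_keys_modify _ _ _ _ (nodup_keys_modify _ _ _ _ hn0))
    have hn1a : h1a.keys.Nodup := nodup_keys_modify _ _ _ _ hn1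
    -- B's updated state
    have s1 := bumpB_spec d nz x0 1 hnd hz
    set st1 := bumpB (d, nz) x0 1 with hst1
    have s2 := bumpB_spec st1.1 st1.2 x1 1 s1.1 s1.2.1
    set st2 := bumpB st1 x1 1 with hst2
    have s3 := bumpB_spec st2.1 st2.2 y (-2) s2.1 s2.2.1
    set st3 := bumpB st2 y (-2) with hst3
    have hrel3 : ∀ c, st3.1.getD c 0 = h0a.getD c 0 - h1a.getD c 0 := by
      intro c
      rw [s3.2.2 c, s2.2.2 c, s1.2.2 c, hh0a, hh1a, getD_update_A h0 h1 x0 x1 y c, hrel c]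
    -- the two stopping conditions agree
    have hcond : (histDistA h0a h1a).1 = 0 ↔ st3.2 = 0 := by
      rw [(histDistA_spec h0a h1a hn0a hn1a).1, s3.2.1, Z_eq_zero_iff]
      constructor <;> intro h c <;> have := hrel3 c <;> have := h c <;> omega
    by_cases hlt : amax < t
    · rw [if_pos hlt]
      by_cases hz0 : st3.2 = 0
      · rw [if_pos (hcond.2 hz0), if_pos ⟨hlt, hz0⟩]
      · rw [if_neg (fun h => hz0 (hcond.1 h)), if_neg (fun h => hz0 h.2)]
        obtain ⟨_, g0, g1, hn0x, hn1x⟩ := histDistA_spec h0a h1a hn0a hn1a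
        exact ih _ _ st3.1 st3.2
          ⟨hn0x, hn1x, s3.1, fun c => by rw [hrel3 c, g0 c, g1 c], s3.2.1⟩
    · rw [if_neg hlt, if_neg (fun h => hlt h.1)]
      exact ih _ _ st3.1 st3.2 ⟨hn0a, hn1a, s3.1, hrel3, s3.2.1⟩

-- ===== VERDICT (by name: the statement is the Claim_ definition above) =====
theorem anagram_suffix_spec : Claim_equal_anagram_suffix := by
  intro s amax _
  unfold Spec_anagram_suffix anagram_suffix anagram_suffix_alt
  apply loop_eq
  refine ⟨PySem.Dict.nodup_keys_empty, PySem.Dict.nodup_keys_empty, PySem.Dict.nodup_keys_empty, ?_, ?_⟩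
  · intro c; simp [PySem.Dict.getD_empty]
  · exact Z_empty.symm
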